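-- pv_equiv track=rewrite | github.com/8FAX/CompSci141 | final/wordData.py | post_process
-- ===== SOURCE A (Python) =====
-- def post_process(words: dict) -> dict:
--     """
--     This Python function post-processes a dictionary of words by filling in missing years with a value
--     of 0 for each word.
--
--     Author - Liam Scott
--     Last update - 04/26/2024
--     @param words (dict) - A dictionary where the keys are words and the values are dictionaries
--     containing years as keys and some values associated with those years.
--     @returns A dictionary containing the words as keys and a dictionary of years as keys and counts as
--     values for each word. The years range from 1900 to 2024, with counts of 0 for any missing years in
--     the original input dictionary.
--
--     """
--     result_dict = {}
--     for word in words: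
--         sub_dict = words[word]
--         new_sub_dict = {}
--         for year in range(1900, 2009):
--             if year not in sub_dict:
--                 new_sub_dict[year] = 0
--             else:
--                 new_sub_dict[year] = sub_dict[year]
--         result_dict[word] = new_sub_dict
--     return result_dict
-- ===== SOURCE B (Python) =====
-- def post_process(words: dict) -> dict:
--     result_dict = {}
--     for word, sub_dict in words.items():
--         present = sorted(y for y in sub_dict if 1900 <= y < 2009)
--         pairs = []
--         nxt = 1900
--         for ky in present:
--             pairs.extend((z, 0) for z in range(nxt, ky))
--             pairs.append((ky, sub_dict[ky]))
--             nxt = ky + 1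
--         pairs.extend((z, 0) for z in range(nxt, 2009))
--         result_dict[word] = dict(pairs)
--     return result_dict
-- ===== Notes on version B (the rewrite author's own statement) =====
-- stated objective: alternative
-- what changed: B replaces A's per-year probing of the input dict by a sort-and-merge: per word it sorts the in-range year keys of the input and merges them with zero-filled gap runs into the pair list, instead of scanning 1900..2008 and testing membership for every year.
import Mathlib
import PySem

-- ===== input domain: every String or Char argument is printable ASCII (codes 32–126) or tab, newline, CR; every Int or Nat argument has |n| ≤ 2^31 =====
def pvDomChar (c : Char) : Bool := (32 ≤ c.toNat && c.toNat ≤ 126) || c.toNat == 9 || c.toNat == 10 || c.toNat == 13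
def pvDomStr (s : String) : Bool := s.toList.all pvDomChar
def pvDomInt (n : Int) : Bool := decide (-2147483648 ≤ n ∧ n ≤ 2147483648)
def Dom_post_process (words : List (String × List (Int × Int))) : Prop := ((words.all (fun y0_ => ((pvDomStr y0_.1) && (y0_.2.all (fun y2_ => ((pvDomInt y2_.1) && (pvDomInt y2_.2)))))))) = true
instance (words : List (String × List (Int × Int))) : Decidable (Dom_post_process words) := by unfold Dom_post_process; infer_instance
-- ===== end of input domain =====

-- B replaces A's per-year probing of the input dict by a sort-and-merge: it sorts the word's
-- in-range year keys and merges them with runs of zero-filled gap years (objective: alternative).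

-- ===== PORT A =====
-- inner loop of A: for year in range(1900, 2009): if year not in sub_dict: new[year]=0 else new[year]=sub_dict[year]
-- (sub_dict[year] in the else branch is ported as getD: contains is true there, so get? = some)
def pvInnerA (sub : List (Int × Int)) : List (Int × Int) :=
  ((PySem.List.pyRange 1900 2009 1).foldl
    (fun nd year =>
      if (PySem.Dict.mk sub).contains year = false then
        nd.insert year (0 : Int)
      else
        nd.insert year ((PySem.Dict.mk sub).getD year 0))
    PySem.Dict.empty).items

def post_process (words : List (String × List (Int × Int))) : List (String × List (Int × Int)) :=
  (words.foldl (fun rd p => rd.insert p.1 (pvInnerA p.2)) PySem.Dict.empty).items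

-- ===== PORT B =====
-- inner of B: present = sorted(y for y in sub_dict if 1900 <= y < 2009); then merge present
-- with zero runs for the gap years; result_dict[word] = dict(pairs)
-- ('for y in sub_dict' iterates the dict's distinct keys in insertion order: PySem.List.dedup of
--  the first components; 'sub_dict[ky]' is getD, exact since ky is a key)
def pvInnerB (sub : List (Int × Int)) : List (Int × Int) :=
  let present := PySem.List.sorted
      ((PySem.List.dedup (sub.map (·.1))).filter
        (fun y => decide (1900 ≤ y) && decide (y < 2009)))
      (fun x => x) false
  let st := present.foldl
      (fun (st : List (Int × Int) × Int) ky =>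
        (st.1 ++ (PySem.List.pyRange st.2 ky 1).map (fun z => (z, (0 : Int)))
              ++ [(ky, (PySem.Dict.mk sub).getD ky 0)],
         ky + 1))
      ([], 1900)
  (PySem.Dict.ofList
    (st.1 ++ (PySem.List.pyRange st.2 2009 1).map (fun z => (z, (0 : Int))))).items

def post_process_alt (words : List (String × List (Int × Int))) : List (String × List (Int × Int)) :=
  (words.foldl (fun rd p => rd.insert p.1 (pvInnerB p.2)) PySem.Dict.empty).items

-- ===== PRECONDITION & SPEC =====
def Spec_post_process (words : List (String × List (Int × Int))) (out : List (String × List (Int × Int))) : Prop := out = post_process_alt words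
instance (words : List (String × List (Int × Int))) (out : List (String × List (Int × Int))) : Decidable (Spec_post_process words out) := by unfold Spec_post_process; infer_instance

-- ===== CLAIM (what is proved, stated in full; the proofs are below) =====
def Claim_equal_post_process : Prop := ∀ (words : List (String × List (Int × Int))), Dom_post_process words → Spec_post_process words (post_process words)

-- ===== LEMMAS AND PROOFS =====

-- value A stores for year y
def pvValA (sub : List (Int × Int)) (y : Int) : Int :=
  if (PySem.Dict.mk sub).contains y = false then 0 else (PySem.Dict.mk sub).getD y 0

lemma pvInnerA_eq_map (sub : List (Int × Int)) :
    pvInnerA sub = (PySem.List.pyRange 1900 2009 1).map (fun y => (y, pvValA sub y)) := by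
  unfold pvInnerA
  have hstep : (fun (nd : PySem.Dict Int Int) year =>
      if (PySem.Dict.mk sub).contains year = false then
        nd.insert year (0 : Int)
      else
        nd.insert year ((PySem.Dict.mk sub).getD year 0))
      = fun nd year => nd.insert year (pvValA sub year) := by
    funext nd year
    unfold pvValA
    split <;> rfl
  rw [hstep,
    PySem.Dict.items_foldl_insert_fresh (PySem.List.pyRange 1900 2009 1) (fun y => y)
      (pvValA sub) PySem.Dict.empty
      (by intro a _; simp) (by simpa using PySem.List.nodup_pyRange_one 1900 2009)]
  simp [PySem.Dict.empty]

-- B's sorted present list IS the in-range keys in ascending order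
lemma pvPresent_eq (sub : List (Int × Int)) :
    PySem.List.sorted
      ((PySem.List.dedup (sub.map (·.1))).filter
        (fun y => decide (1900 ≤ y) && decide (y < 2009)))
      (fun x => x) false
    = (PySem.List.pyRange 1900 2009 1).filter (fun y => (PySem.Dict.mk sub).contains y) := by
  apply PySem.List.sorted_eq_of_perm_of_pairwise_lt
  · rw [List.perm_ext_iff_of_nodup
      ((PySem.List.nodup_pyRange_one 1900 2009).filter _)
      ((PySem.List.nodup_dedup (sub.map (·.1))).filter _)]
    intro y
    simp [List.mem_filter, PySem.List.mem_pyRange_one, and_comm]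
  · exact (PySem.List.pairwise_lt_pyRange_one 1900 2009).filter _

-- the merge loop, characterised: a strictly increasing key list in [lo, 2009) merges to the full range
lemma pvMerge_spec (sub : List (Int × Int)) :
    ∀ (ks : List Int) (acc : List (Int × Int)) (lo : Int),
      ks.Pairwise (· < ·) → (∀ y ∈ ks, lo ≤ y ∧ y < 2009) →
      (ks.foldl
        (fun (st : List (Int × Int) × Int) ky =>
          (st.1 ++ (PySem.List.pyRange st.2 ky 1).map (fun z => (z, (0 : Int)))
                ++ [(ky, (PySem.Dict.mk sub).getD ky 0)],
           ky + 1))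
        (acc, lo)).1
      ++ (PySem.List.pyRange
            (ks.foldl
              (fun (st : List (Int × Int) × Int) ky =>
                (st.1 ++ (PySem.List.pyRange st.2 ky 1).map (fun z => (z, (0 : Int)))
                      ++ [(ky, (PySem.Dict.mk sub).getD ky 0)],
                 ky + 1))
              (acc, lo)).2 2009 1).map (fun z => (z, (0 : Int)))
      = acc ++ (PySem.List.pyRange lo 2009 1).map
          (fun y => (y, if y ∈ ks then (PySem.Dict.mk sub).getD y 0 else 0)) := by
  intro ks
  induction ks with
  | nil =>
    intro acc lo _ _
    simp
  | cons k ks ih =>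
    intro acc lo hpw hb
    obtain ⟨hk, hks⟩ := List.pairwise_cons.mp hpw
    have hlok : lo ≤ k := (hb k (List.mem_cons_self)).1
    have hk2009 : k < 2009 := (hb k (List.mem_cons_self)).2
    simp only [List.foldl_cons]
    rw [ih _ (k + 1) hks
      (by intro y hy; exact ⟨by have := hk y hy; omega, (hb y (List.mem_cons_of_mem _ hy)).2⟩)]
    rw [PySem.List.pyRange_one_append lo k 2009 hlok (by omega),
      PySem.List.pyRange_one_cons (by omega : k < 2009)]
    simp only [List.map_append, List.map_cons, List.append_assoc, List.cons_append,
      List.nil_append]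
    have h1 : (PySem.List.pyRange lo k 1).map
        (fun y => (y, if y ∈ k :: ks then (PySem.Dict.mk sub).getD y 0 else 0))
        = (PySem.List.pyRange lo k 1).map (fun z => (z, (0 : Int))) := by
      apply List.map_congr_left
      intro y hy
      have hy' := (PySem.List.mem_pyRange_one).mp hy
      have hyk : y ∉ k :: ks := by
        intro hmem
        rcases List.mem_cons.mp hmem with h | h
        · omega
        · have := hk y h; omega
      simp [hyk]
    have h2 : (PySem.List.pyRange (k + 1) 2009 1).map
        (fun y => (y, if y ∈ k :: ks then (PySem.Dict.mk sub).getD y 0 else 0))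
        = (PySem.List.pyRange (k + 1) 2009 1).map
          (fun y => (y, if y ∈ ks then (PySem.Dict.mk sub).getD y 0 else 0)) := by
      apply List.map_congr_left
      intro y hy
      have hy' := (PySem.List.mem_pyRange_one).mp hy
      have hmemiff : (y ∈ k :: ks) ↔ (y ∈ ks) := by
        simp only [List.mem_cons]
        constructor
        · rintro (h | h)
          · omega
          · exact h
        · exact Or.inr
      simp only [hmemiff]
    rw [h1, h2]
    simp

-- dict(pairs) of a nodup-key pair list returns exactly that list as items
lemma pvOfList_items (l : List (Int × Int)) (h : (l.map (·.1)).Nodup) :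
    (PySem.Dict.ofList l).items = l := by
  have : PySem.Dict.ofList l = l.foldl (fun d p => d.insert p.1 p.2) PySem.Dict.empty := rfl
  rw [this,
    PySem.Dict.items_foldl_insert_fresh l (·.1) (·.2) PySem.Dict.empty
      (by intro a _; simp) h]
  simp [PySem.Dict.empty]

lemma pvInnerB_eq_map (sub : List (Int × Int)) :
    pvInnerB sub = (PySem.List.pyRange 1900 2009 1).map (fun y => (y, pvValA sub y)) := by
  simp only [pvInnerB]
  rw [pvPresent_eq]
  have hpairs := pvMerge_spec sub
      ((PySem.List.pyRange 1900 2009 1).filter (fun y => (PySem.Dict.mk sub).contains y))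
      [] 1900
      ((PySem.List.pairwise_lt_pyRange_one 1900 2009).filter _)
      (by intro y hy
          have := (PySem.List.mem_pyRange_one).mp (List.mem_of_mem_filter hy)
          exact this)
  simp only [List.nil_append] at hpairs
  rw [hpairs, pvOfList_items]
  · apply List.map_congr_left
    intro y hy
    unfold pvValA
    by_cases hc : (PySem.Dict.mk sub).contains y = true
    · have hmem : y ∈ (PySem.List.pyRange 1900 2009 1).filter
          (fun y => (PySem.Dict.mk sub).contains y) := List.mem_filter.mpr ⟨hy, hc⟩
      rw [if_pos hmem, if_neg (by simp [hc])]
    · have hmem : y ∉ (PySem.List.pyRange 1900 2009 1).filter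
          (fun y => (PySem.Dict.mk sub).contains y) := fun h => hc (List.mem_filter.mp h).2
      rw [if_neg hmem, if_pos (Bool.eq_false_iff.mpr hc)]
  · have : ((PySem.List.pyRange 1900 2009 1).map
        (fun y => (y, if y ∈ (PySem.List.pyRange 1900 2009 1).filter
          (fun y => (PySem.Dict.mk sub).contains y) then (PySem.Dict.mk sub).getD y 0 else 0))).map (·.1)
        = PySem.List.pyRange 1900 2009 1 := by
      rw [List.map_map]
      exact (List.map_congr_left fun y _ => rfl).trans (List.map_id _)
    rw [this]
    exact PySem.List.nodup_pyRange_one 1900 2009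

lemma pvInner_eq (sub : List (Int × Int)) : pvInnerA sub = pvInnerB sub := by
  rw [pvInnerA_eq_map, pvInnerB_eq_map]

-- ===== VERDICT (by name: the statement is the Claim_ definition above) =====
theorem post_process_spec : Claim_equal_post_process := by
  intro words _
  unfold Spec_post_process post_process post_process_alt
  have h : (fun (rd : PySem.Dict String (List (Int × Int))) (p : String × List (Int × Int)) =>
      rd.insert p.1 (pvInnerA p.2)) = fun rd p => rd.insert p.1 (pvInnerB p.2) := by
    funext rd p
    rw [pvInner_eq]
  rw [h]
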